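-- pv_equiv track=rewrite | github.com/evalkov/RFantibodyOptimizer | src/rfantibody/protenix/mlx/weight_converter.py | _remap_conditioning_suffix
-- ===== SOURCE A (Python) =====
-- def _remap_conditioning_suffix(suffix: str) -> str | None:
--     """Map a suffix within diffusion_module.diffusion_conditioning.<suffix>."""
--     if suffix == 'fourier_embedding.w':
--         return 'fourier_emb.w'
--     if suffix == 'fourier_embedding.b':
--         return None
--     if suffix in ('layernorm_n.weight', 'layernorm_s.weight', 'layernorm_z.weight'):
--         return None
--     if suffix == 'linear_no_bias_n.weight':
--         return 'linear_n.weight'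
--     if suffix == 'linear_no_bias_s.weight':
--         return 'linear_s.weight'
--     if suffix == 'linear_no_bias_z.weight':
--         return None
--     if suffix.startswith('relpe.'):
--         return None
--
--     # Transitions
--     for tname in ('transition_s1', 'transition_s2', 'transition_z1', 'transition_z2'):
--         if suffix.startswith(tname + '.'):
--             rest = suffix[len(tname) + 1:]
--             m = {
--                 'linear_no_bias_a.weight': 'linear_gate.weight',
--                 'linear_no_bias_b.weight': 'linear_value.weight',
--                 'linear_no_bias.weight': 'linear_out.weight',
--                 'layernorm1.weight': None,
--                 'layernorm1.bias': None,
--             }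
--             mapped = m.get(rest)
--             if mapped is None:
--                 return None
--             return f'{tname}.{mapped}'
--
--     return None
-- ===== SOURCE B (Python) =====
-- _SUFFIX_TABLE = {
--     'fourier_embedding.w': 'fourier_emb.w',
--     'linear_no_bias_n.weight': 'linear_n.weight',
--     'linear_no_bias_s.weight': 'linear_s.weight',
-- }
-- for _t in ('transition_s1', 'transition_s2', 'transition_z1', 'transition_z2'):
--     _SUFFIX_TABLE[f'{_t}.linear_no_bias_a.weight'] = f'{_t}.linear_gate.weight'
--     _SUFFIX_TABLE[f'{_t}.linear_no_bias_b.weight'] = f'{_t}.linear_value.weight'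
--     _SUFFIX_TABLE[f'{_t}.linear_no_bias.weight'] = f'{_t}.linear_out.weight'
--
--
-- def _remap_conditioning_suffix(suffix: str) -> str | None:
--     return _SUFFIX_TABLE.get(suffix)
-- ===== Notes on version B (the rewrite author's own statement) =====
-- stated objective: simpler
-- what changed: Replaces A's branch cascade with prefix scanning, slicing and an inner dict over the transition names by one module-level flat dict from full suffix to renamed suffix, built once; the function body is a single TABLE.get(suffix).
import Mathlib
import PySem

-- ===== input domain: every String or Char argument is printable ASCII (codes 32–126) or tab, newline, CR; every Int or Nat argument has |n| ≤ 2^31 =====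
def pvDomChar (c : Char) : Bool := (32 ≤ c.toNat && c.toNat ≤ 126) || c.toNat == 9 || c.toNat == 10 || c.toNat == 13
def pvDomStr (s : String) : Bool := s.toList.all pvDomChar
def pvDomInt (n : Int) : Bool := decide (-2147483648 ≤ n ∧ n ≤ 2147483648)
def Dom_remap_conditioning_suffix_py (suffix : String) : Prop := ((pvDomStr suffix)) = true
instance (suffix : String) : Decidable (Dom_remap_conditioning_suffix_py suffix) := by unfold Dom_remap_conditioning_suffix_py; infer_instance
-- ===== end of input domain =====

-- B replaces A's branch cascade (prefix scan + inner dict per transition name) with one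
-- precomputed flat suffix→rename table and a single lookup; objective: simpler.

-- ===== PORT A =====
-- the literal dict `m` inside A's transition loop (values may be None → Option String)
def pvTransDictA : PySem.Dict String (Option String) :=
  PySem.Dict.ofList [
    ("linear_no_bias_a.weight", some "linear_gate.weight"),
    ("linear_no_bias_b.weight", some "linear_value.weight"),
    ("linear_no_bias.weight", some "linear_out.weight"),
    ("layernorm1.weight", none),
    ("layernorm1.bias", none)]
-- loop body: rest = suffix[len(tname)+1:]; mapped = m.get(rest); "if mapped is None: return None"
-- covers both an absent key and a stored None value, hence the wildcard arm
def pvTransBodyA (tname suffix : String) : Option String :=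
  let rest := PySem.Str.slice suffix (some (PySem.Str.len tname + 1)) none
  match pvTransDictA.get? rest with
  | some (some mapped) => some (tname ++ "." ++ mapped)
  | _ => none

-- "for tname in (...)": first matching prefix wins, else fall through to "return None"
def pvTransLoopA : List String → String → Option String
  | [], _ => none
  | tname :: rest, suffix =>
    if PySem.Str.startswith suffix (tname ++ ".") then pvTransBodyA tname suffix
    else pvTransLoopA rest suffix
def remap_conditioning_suffix_py (suffix : String) : Option String :=
  if suffix = "fourier_embedding.w" then some "fourier_emb.w"
  else if suffix = "fourier_embedding.b" then none
  else if suffix = "layernorm_n.weight" ∨ suffix = "layernorm_s.weight" ∨ suffix = "layernorm_z.weight" then none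
  else if suffix = "linear_no_bias_n.weight" then some "linear_n.weight"
  else if suffix = "linear_no_bias_s.weight" then some "linear_s.weight"
  else if suffix = "linear_no_bias_z.weight" then none
  else if PySem.Str.startswith suffix "relpe." then none
  else pvTransLoopA ["transition_s1", "transition_s2", "transition_z1", "transition_z2"] suffix
-- ===== PORT B =====
-- the module-level table of Source B: three fixed entries, then three generated per transition name
def pvTableB : PySem.Dict String String :=
  (["transition_s1", "transition_s2", "transition_z1", "transition_z2"]).foldl
    (fun d t =>
      ((d.insert (t ++ ".linear_no_bias_a.weight") (t ++ ".linear_gate.weight")).insert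
        (t ++ ".linear_no_bias_b.weight") (t ++ ".linear_value.weight")).insert
        (t ++ ".linear_no_bias.weight") (t ++ ".linear_out.weight"))
    (PySem.Dict.ofList [("fourier_embedding.w", "fourier_emb.w"),
      ("linear_no_bias_n.weight", "linear_n.weight"),
      ("linear_no_bias_s.weight", "linear_s.weight")])
def remap_conditioning_suffix_py_alt (suffix : String) : Option String :=
  pvTableB.get? suffix
-- ===== PRECONDITION & SPEC =====
def Spec_remap_conditioning_suffix_py (suffix : String) (out : Option String) : Prop := out = remap_conditioning_suffix_py_alt suffix
instance (suffix : String) (out : Option String) : Decidable (Spec_remap_conditioning_suffix_py suffix out) := by unfold Spec_remap_conditioning_suffix_py; infer_instance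

-- ===== CLAIM (what is proved, stated in full; the proofs are below) =====
def Claim_equal_remap_conditioning_suffix_py : Prop := ∀ (suffix : String), Dom_remap_conditioning_suffix_py suffix → Spec_remap_conditioning_suffix_py suffix (remap_conditioning_suffix_py suffix)

-- ===== LEMMAS AND PROOFS =====

-- if suffix startswith p then suffix splits as p ++ suffix[len(p):]
lemma pv_suffix_split (s p : String) (h : PySem.Str.startswith s p = true) :
    s.toList = p.toList ++ (PySem.Str.slice s (some (PySem.Str.len p)) none).toList := by
  rw [PySem.Str.startswith_eq, PySem.Chars.startswith_iff] at h
  rw [PySem.Str.toList_slice, PySem.Chars.slice_eq_listSlice, PySem.Str.len_eq,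
    PySem.List.slice_from_natCast]
  exact (List.prefix_iff_eq_append.mp h).symm

lemma pv_bodyA_none (suffix t : String)
    (hs : PySem.Str.startswith suffix (t ++ ".") = true)
    (ha : suffix ≠ t ++ ".linear_no_bias_a.weight")
    (hb : suffix ≠ t ++ ".linear_no_bias_b.weight")
    (ho : suffix ≠ t ++ ".linear_no_bias.weight") :
    pvTransBodyA t suffix = none := by
  have hlen : PySem.Str.len t + 1 = PySem.Str.len (t ++ ".") := by
    have h1 : PySem.Str.len "." = 1 := by decide
    rw [PySem.Str.len_append, h1]
  have hsplit := pv_suffix_split suffix (t ++ ".") hs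
  unfold pvTransBodyA
  rw [hlen]
  set r := PySem.Str.slice suffix (some (PySem.Str.len (t ++ "."))) none with hr
  have key : ∀ k : String, r = k → suffix = t ++ ("." ++ k) := by
    intro k hk
    apply String.toList_inj.mp
    rw [hsplit, hk]
    simp [List.append_assoc]
  have ha' : suffix ≠ t ++ ("." ++ "linear_no_bias_a.weight") := by simpa using ha
  have hb' : suffix ≠ t ++ ("." ++ "linear_no_bias_b.weight") := by simpa using hb
  have ho' : suffix ≠ t ++ ("." ++ "linear_no_bias.weight") := by simpa using ho
  have g1 : r ≠ "linear_no_bias_a.weight" := fun h => ha' (key _ h)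
  have g2 : r ≠ "linear_no_bias_b.weight" := fun h => hb' (key _ h)
  have g3 : r ≠ "linear_no_bias.weight" := fun h => ho' (key _ h)
  have hdict : pvTransDictA = ⟨[
    ("linear_no_bias_a.weight", some "linear_gate.weight"),
    ("linear_no_bias_b.weight", some "linear_value.weight"),
    ("linear_no_bias.weight", some "linear_out.weight"),
    ("layernorm1.weight", none),
    ("layernorm1.bias", none)]⟩ := by decide
  by_cases g4 : r = "layernorm1.weight"
  · simp [hdict, PySem.Dict.get?_mk_cons, g4]
  by_cases g5 : r = "layernorm1.bias"
  · simp [hdict, PySem.Dict.get?_mk_cons, g5]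
  have : pvTransDictA.get? r = none := by
    simp [hdict, PySem.Dict.get?,
      Ne.symm g1, Ne.symm g2, Ne.symm g3, Ne.symm g4, Ne.symm g5]
  simp [this]
-- Source B's table, flattened to its literal item list (proved equal by `decide` in pv_main)
def pvTableItems : List (String × String) := [
  ("fourier_embedding.w", "fourier_emb.w"),
  ("linear_no_bias_n.weight", "linear_n.weight"),
  ("linear_no_bias_s.weight", "linear_s.weight"),
  ("transition_s1.linear_no_bias_a.weight", "transition_s1.linear_gate.weight"),
  ("transition_s1.linear_no_bias_b.weight", "transition_s1.linear_value.weight"),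
  ("transition_s1.linear_no_bias.weight", "transition_s1.linear_out.weight"),
  ("transition_s2.linear_no_bias_a.weight", "transition_s2.linear_gate.weight"),
  ("transition_s2.linear_no_bias_b.weight", "transition_s2.linear_value.weight"),
  ("transition_s2.linear_no_bias.weight", "transition_s2.linear_out.weight"),
  ("transition_z1.linear_no_bias_a.weight", "transition_z1.linear_gate.weight"),
  ("transition_z1.linear_no_bias_b.weight", "transition_z1.linear_value.weight"),
  ("transition_z1.linear_no_bias.weight", "transition_z1.linear_out.weight"),
  ("transition_z2.linear_no_bias_a.weight", "transition_z2.linear_gate.weight"),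
  ("transition_z2.linear_no_bias_b.weight", "transition_z2.linear_value.weight"),
  ("transition_z2.linear_no_bias.weight", "transition_z2.linear_out.weight")]
theorem pv_main (suffix : String) :
    remap_conditioning_suffix_py suffix = remap_conditioning_suffix_py_alt suffix := by
  by_cases e1 : suffix = "fourier_embedding.w"
  · subst e1; decide
  by_cases e2 : suffix = "linear_no_bias_n.weight"
  · subst e2; decide
  by_cases e3 : suffix = "linear_no_bias_s.weight"
  · subst e3; decide
  by_cases e4 : suffix = "transition_s1.linear_no_bias_a.weight"
  · subst e4; decide
  by_cases e5 : suffix = "transition_s1.linear_no_bias_b.weight"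
  · subst e5; decide
  by_cases e6 : suffix = "transition_s1.linear_no_bias.weight"
  · subst e6; decide
  by_cases e7 : suffix = "transition_s2.linear_no_bias_a.weight"
  · subst e7; decide
  by_cases e8 : suffix = "transition_s2.linear_no_bias_b.weight"
  · subst e8; decide
  by_cases e9 : suffix = "transition_s2.linear_no_bias.weight"
  · subst e9; decide
  by_cases e10 : suffix = "transition_z1.linear_no_bias_a.weight"
  · subst e10; decide
  by_cases e11 : suffix = "transition_z1.linear_no_bias_b.weight"
  · subst e11; decide
  by_cases e12 : suffix = "transition_z1.linear_no_bias.weight"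
  · subst e12; decide
  by_cases e13 : suffix = "transition_z2.linear_no_bias_a.weight"
  · subst e13; decide
  by_cases e14 : suffix = "transition_z2.linear_no_bias_b.weight"
  · subst e14; decide
  by_cases e15 : suffix = "transition_z2.linear_no_bias.weight"
  · subst e15; decide
  have hB : remap_conditioning_suffix_py_alt suffix = none := by
    have htab : pvTableB = ⟨pvTableItems⟩ := by decide
    simp [remap_conditioning_suffix_py_alt, htab, pvTableItems, PySem.Dict.get?,
      Ne.symm e1, Ne.symm e2, Ne.symm e3, Ne.symm e4, Ne.symm e5, Ne.symm e6, Ne.symm e7, Ne.symm e8, Ne.symm e9, Ne.symm e10, Ne.symm e11, Ne.symm e12, Ne.symm e13, Ne.symm e14, Ne.symm e15]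
  rw [hB]
  have hLoop : pvTransLoopA ["transition_s1", "transition_s2", "transition_z1", "transition_z2"] suffix = none := by
    simp only [pvTransLoopA]
    by_cases hs1 : PySem.Str.startswith suffix ("transition_s1" ++ ".") = true
    · simp only [hs1, if_true]
      exact pv_bodyA_none suffix "transition_s1" hs1 (by simpa using e4) (by simpa using e5) (by simpa using e6)
    simp only [hs1, if_false, Bool.false_eq_true]
    by_cases hs2 : PySem.Str.startswith suffix ("transition_s2" ++ ".") = true
    · simp only [hs2, if_true]
      exact pv_bodyA_none suffix "transition_s2" hs2 (by simpa using e7) (by simpa using e8) (by simpa using e9)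
    simp only [hs2, if_false, Bool.false_eq_true]
    by_cases hs3 : PySem.Str.startswith suffix ("transition_z1" ++ ".") = true
    · simp only [hs3, if_true]
      exact pv_bodyA_none suffix "transition_z1" hs3 (by simpa using e10) (by simpa using e11) (by simpa using e12)
    simp only [hs3, if_false, Bool.false_eq_true]
    by_cases hs4 : PySem.Str.startswith suffix ("transition_z2" ++ ".") = true
    · simp only [hs4, if_true]
      exact pv_bodyA_none suffix "transition_z2" hs4 (by simpa using e13) (by simpa using e14) (by simpa using e15)
    simp only [hs4, if_false, Bool.false_eq_true]
  simp [remap_conditioning_suffix_py, hLoop, e1, e2, e3]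

-- ===== VERDICT (by name: the statement is the Claim_ definition above) =====
theorem remap_conditioning_suffix_py_spec : Claim_equal_remap_conditioning_suffix_py := by
  intro suffix _
  exact pv_main suffix
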